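-- pv_equiv track=rewrite | github.com/johnnchung/Hack-the-6ix-2021 | Preprocessing Code.py | NosOfSubdomain
-- ===== SOURCE A (Python) =====
-- def NosOfSubdomain(string):
--     split = string.split('.')
--     if('/' not in string):
--         return len(split) - 1
--     else:
--         count = 0
--         for val in split:
--             if('/' in val):
--                 break
--             else:
--                 count += 1
--
--         return count
-- ===== SOURCE B (Python) =====
-- def NosOfSubdomain(string):
--     idx = string.find('/')
--     prefix = string if idx == -1 else string[:idx]
--     return prefix.count('.')
-- ===== Notes on version B (the rewrite author's own statement) =====
-- stated objective: simpler
-- what changed: B replaces A's split-on-dot plus a counting loop with a break by slicing the string at the first slash (whole string if none) and counting the dots in that prefix directly.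
import Mathlib
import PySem

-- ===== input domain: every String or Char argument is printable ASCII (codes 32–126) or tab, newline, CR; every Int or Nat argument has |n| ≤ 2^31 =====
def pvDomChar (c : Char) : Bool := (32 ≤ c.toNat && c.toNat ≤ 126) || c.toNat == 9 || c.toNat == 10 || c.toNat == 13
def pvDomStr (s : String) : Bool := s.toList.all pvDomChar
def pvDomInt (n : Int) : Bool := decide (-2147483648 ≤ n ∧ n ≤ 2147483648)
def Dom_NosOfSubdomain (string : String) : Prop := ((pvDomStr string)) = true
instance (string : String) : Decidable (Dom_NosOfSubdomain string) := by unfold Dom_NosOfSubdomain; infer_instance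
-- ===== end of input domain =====

-- B replaces A's split-on-dot plus a counting loop with a break by a slice at the first slash
-- and a direct dot-count over that prefix (objective: simpler); equal return value on all strings.

-- ===== PORT A =====
-- the 'for val in split: if '/' in val: break else count += 1' loop
def pvLoopA : List (List Char) → Int → Int
  | [], count => count
  | v :: rest, count =>
    if PySem.Chars.isIn ['/'] v then count else pvLoopA rest (count + 1)

def NosOfSubdomain (string : String) : Int :=
  let split := PySem.Chars.splitOn string.toList ['.']
  if !(PySem.Str.isIn "/" string) then (split.length : Int) - 1
  else pvLoopA split 0

-- ===== PORT B =====
def NosOfSubdomain_alt (string : String) : Int :=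
  let idx := PySem.Str.find string "/"
  let pre := if idx == -1 then string else PySem.Str.slice string none (some idx)
  ((PySem.Str.count pre "." : Nat) : Int)

-- ===== PRECONDITION & SPEC =====
def Spec_NosOfSubdomain (string : String) (out : Int) : Prop := out = NosOfSubdomain_alt string
instance (string : String) (out : Int) : Decidable (Spec_NosOfSubdomain string out) := by unfold Spec_NosOfSubdomain; infer_instance

-- ===== CLAIM (what is proved, stated in full; the proofs are below) =====
def Claim_equal_NosOfSubdomain : Prop := ∀ (string : String), Dom_NosOfSubdomain string → Spec_NosOfSubdomain string (NosOfSubdomain string)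

-- ===== LEMMAS AND PROOFS =====

-- single-char s.count(c) is List.count
theorem pvCountGo (c : Char) (l : List Char) (fuel : Nat) (acc : Nat)
    (h : l.length ≤ fuel) : PySem.Chars.count.go [c] fuel l acc = acc + l.count c := by
  induction l generalizing fuel acc with
  | nil => cases fuel <;> simp [PySem.Chars.count.go]
  | cons x t ih =>
    cases fuel with
    | zero => simp at h
    | succ fuel =>
      simp only [List.length_cons, Nat.add_le_add_iff_right] at h
      by_cases hx : x = c
      · subst hx
        simp [PySem.Chars.count.go, List.isPrefixOf, ih _ _ h]
        omega
      · have hcx : (c == x) = false := by simp [Ne.symm hx]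
        simp [PySem.Chars.count.go, List.isPrefixOf,
          (by simpa using hx : ¬ (x == c) = true), ih _ _ h, List.count_cons, hcx]

theorem pvCountSingle (cs : List Char) (c : Char) :
    PySem.Chars.count cs [c] = cs.count c := by
  simp [PySem.Chars.count, pvCountGo c cs cs.length 0 le_rfl]

-- a structural version of split('.')
def pvSplit1 : List Char → List (List Char)
  | [] => [[]]
  | c :: rest => if c = '.' then [] :: pvSplit1 rest else (pvSplit1 rest).modifyHead (c :: ·)

theorem pvLenSplit1 (cs : List Char) : (pvSplit1 cs).length = cs.count '.' + 1 := by
  induction cs with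
  | nil => simp [pvSplit1]
  | cons c rest ih =>
    by_cases hc : c = '.'
    · subst hc; simp [pvSplit1, ih]
    · have hcx : ('.' == c) = false := by simp [Ne.symm hc]
      simp [pvSplit1, hc, ih]

theorem pvSplit1_ne_nil (cs : List Char) : pvSplit1 cs ≠ [] := by
  intro h
  have := pvLenSplit1 cs
  rw [h] at this
  simp at this

theorem pvModifyHead_id {α : Type} (l : List α) : List.modifyHead (fun x => x) l = l := by
  cases l <;> simp

theorem pvSplitGo (l : List Char) (fuel : Nat) (cur : List Char) (acc : List (List Char))
    (h : l.length ≤ fuel) :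
    PySem.Chars.splitOn.go ['.'] fuel l cur acc
      = acc.reverse ++ (pvSplit1 l).modifyHead (cur.reverse ++ ·) := by
  induction l generalizing fuel cur acc with
  | nil => cases fuel <;> simp [PySem.Chars.splitOn.go, pvSplit1]
  | cons x t ih =>
    cases fuel with
    | zero => simp at h
    | succ fuel =>
      simp only [List.length_cons, Nat.add_le_add_iff_right] at h
      rw [PySem.Chars.splitOn.go]
      by_cases hx : x = '.'
      · subst hx
        rw [if_pos (by simp [List.isPrefixOf])]
        simp only [List.length_cons, List.length_nil, List.drop_succ_cons, List.drop_zero]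
        rw [ih _ _ _ h]
        simp [pvSplit1, pvModifyHead_id]
      · rw [if_neg (by simp [List.isPrefixOf, Ne.symm hx])]
        rw [ih _ _ _ h]
        simp only [pvSplit1, if_neg hx]
        obtain ⟨hh, tt, hs⟩ : ∃ hh tt, pvSplit1 t = hh :: tt := by
          cases hs : pvSplit1 t with
          | nil => exact absurd hs (pvSplit1_ne_nil t)
          | cons a b => exact ⟨a, b, rfl⟩
        simp [hs, List.modifyHead]

theorem pvSplitOn_eq (cs : List Char) :
    PySem.Chars.splitOn cs ['.'] = pvSplit1 cs := by
  rw [PySem.Chars.splitOn, pvSplitGo cs (cs.length + 1) [] [] (by omega)]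
  simp [pvModifyHead_id]

-- '/' in a list of chars, through PySem's isIn
theorem pvIsInSingle (c : Char) (v : List Char) :
    PySem.Chars.isIn [c] v = true ↔ c ∈ v := by
  rw [PySem.Chars.isIn_iff_infix]
  constructor
  · rintro ⟨p, s, h⟩; subst h; simp
  · intro h
    obtain ⟨p, s, h⟩ := List.append_of_mem h
    exact ⟨p, s, by simp [h]⟩

theorem pvLoopA_split1 (cs : List Char) (k : Int) (h : '/' ∈ cs) :
    pvLoopA (pvSplit1 cs) k = k + ((cs.takeWhile (· ≠ '/')).count '.' : Nat) := by
  induction cs generalizing k with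
  | nil => simp at h
  | cons c rest ih =>
    by_cases hc : c = '/'
    · subst hc
      obtain ⟨hh, tt, hs⟩ : ∃ hh tt, pvSplit1 rest = hh :: tt := by
        cases hs : pvSplit1 rest with
        | nil => exact absurd hs (pvSplit1_ne_nil rest)
        | cons a b => exact ⟨a, b, rfl⟩
      have hsp : pvSplit1 ('/' :: rest) = ('/' :: hh) :: tt := by
        simp [pvSplit1, hs, List.modifyHead]
      rw [hsp]
      simp [pvLoopA, (pvIsInSingle '/' ('/' :: hh)).mpr (by simp), List.takeWhile]
    · have hr : '/' ∈ rest := by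
        rcases List.mem_cons.mp h with h1 | h1
        · exact absurd h1.symm hc
        · exact h1
      by_cases hd : c = '.'
      · subst hd
        have hsp : pvSplit1 ('.' :: rest) = [] :: pvSplit1 rest := by simp [pvSplit1]
        rw [hsp]
        have hnin : PySem.Chars.isIn ['/'] ([] : List Char) = false := by decide
        simp only [pvLoopA, hnin, Bool.false_eq_true, if_neg, not_false_eq_true]
        rw [ih (k + 1) hr]
        have ht : ('.' :: rest).takeWhile (· ≠ '/') = '.' :: rest.takeWhile (· ≠ '/') := by
          simp [List.takeWhile]
        rw [ht]
        simp
        omega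
      · obtain ⟨hh, tt, hs⟩ : ∃ hh tt, pvSplit1 rest = hh :: tt := by
          cases hs : pvSplit1 rest with
          | nil => exact absurd hs (pvSplit1_ne_nil rest)
          | cons a b => exact ⟨a, b, rfl⟩
        have hsp : pvSplit1 (c :: rest) = (c :: hh) :: tt := by
          simp [pvSplit1, hd, hs, List.modifyHead]
        rw [hsp]
        have hmem : PySem.Chars.isIn ['/'] (c :: hh) = PySem.Chars.isIn ['/'] hh := by
          by_cases hin : '/' ∈ hh
          · rw [(pvIsInSingle _ _).mpr hin, (pvIsInSingle _ _).mpr (by simp [hin])]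
          · have h1 : PySem.Chars.isIn ['/'] hh = false :=
              Bool.eq_false_iff.mpr (fun hx => hin ((pvIsInSingle _ _).mp hx))
            have h2 : PySem.Chars.isIn ['/'] (c :: hh) = false :=
              Bool.eq_false_iff.mpr (fun hx => by
                rcases List.mem_cons.mp ((pvIsInSingle _ _).mp hx) with h3 | h3
                · exact hc h3.symm
                · exact hin h3)
            rw [h1, h2]
        have hloop : pvLoopA ((c :: hh) :: tt) k = pvLoopA (hh :: tt) k := by
          simp only [pvLoopA, hmem]
        rw [hloop, ← hs, ih k hr]
        have ht : (c :: rest).takeWhile (· ≠ '/') = c :: rest.takeWhile (· ≠ '/') := by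
          simp [List.takeWhile, hc]
        have hcx : ('.' == c) = false := by simp [Ne.symm hd]
        rw [ht]
        simp [hd]

theorem pvTakeWhile_eq_take (cs : List Char) (j : Nat) (hj : j < cs.length)
    (hall : ∀ i, i < j → ∀ (hi : i < cs.length), cs[i] ≠ '/') (hjv : cs[j] = '/') :
    cs.takeWhile (· ≠ '/') = cs.take j := by
  induction cs generalizing j with
  | nil => simp at hj
  | cons c rest ih =>
    cases j with
    | zero =>
      simp only [List.getElem_cons_zero] at hjv
      simp [List.takeWhile, hjv]
    | succ j =>
      have hc : c ≠ '/' := by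
        have := hall 0 (by omega) (by simp)
        simpa using this
      rw [List.takeWhile_cons, if_pos (by simpa using hc), List.take_succ_cons]
      congr 1
      exact ih j (by simpa using hj)
        (fun i hi hi2 => by
          have := hall (i + 1) (by omega) (by simpa using hi2)
          simpa using this)
        (by simpa using hjv)

-- [c] is a prefix of l.drop j iff l[j]? = c
theorem pvSingletonPrefixDrop (l : List Char) (j : Nat) (c : Char) :
    [c] <+: l.drop j ↔ l[j]? = some c := by
  rw [← List.head?_drop]
  cases hd : l.drop j with
  | nil => simp
  | cons a b => simp [List.cons_prefix_cons, eq_comm]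

theorem pvSingletonInfix (cs : List Char) : ['/'] <:+: cs ↔ '/' ∈ cs := by
  constructor
  · rintro ⟨p, s, h⟩; subst h; simp
  · intro h
    obtain ⟨p, s, h⟩ := List.append_of_mem h
    exact ⟨p, s, by simp [h]⟩

-- ===== VERDICT (by name: the statement is the Claim_ definition above) =====
theorem NosOfSubdomain_spec : Claim_equal_NosOfSubdomain := by
  intro s _
  unfold Spec_NosOfSubdomain
  simp only [NosOfSubdomain, NosOfSubdomain_alt, pvSplitOn_eq]
  by_cases hin : '/' ∈ s.toList
  · -- '/' present: A runs the loop, B slices at the first '/'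
    have hinf : ['/'] <:+: s.toList := (pvSingletonInfix s.toList).mpr hin
    have hIs : PySem.Str.isIn "/" s = true := by
      rw [PySem.Str.isIn_iff_infix]; exact hinf
    have hfind : PySem.Str.find s "/" = PySem.Chars.find s.toList ['/'] := by simp
    have hge : 0 ≤ PySem.Chars.find s.toList ['/'] :=
      (PySem.Chars.find_nonneg_iff _ _).mpr hinf
    set j := (PySem.Chars.find s.toList ['/']).toNat with hj
    obtain ⟨hpre, hmin⟩ := PySem.Chars.find_spec (s := s.toList) (sub := ['/']) hge
    have hjget : s.toList[j]? = some '/' := (pvSingletonPrefixDrop _ _ _).mp hpre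
    have hjlt : j < s.toList.length := by
      by_contra hx
      rw [List.getElem?_eq_none (le_of_not_gt hx)] at hjget
      simp at hjget
    have hjv : s.toList[j] = '/' := by
      have := List.getElem?_eq_getElem hjlt
      rw [this] at hjget; exact Option.some.inj hjget
    have hne : (PySem.Str.find s "/" == -1) = false := by
      rw [hfind, beq_eq_false_iff_ne]; omega
    have htake : s.toList.takeWhile (· ≠ '/') = s.toList.take j := by
      refine pvTakeWhile_eq_take s.toList j hjlt (fun i hi hi2 hv => ?_) hjv
      exact hmin i hi ((pvSingletonPrefixDrop _ _ _).mpr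
        (by rw [List.getElem?_eq_getElem hi2, hv]))
    rw [hIs, hne]
    simp only [Bool.not_true, Bool.false_eq_true, if_false]
    have hBtoList : (PySem.Str.slice s none (some (PySem.Str.find s "/"))).toList
        = s.toList.take j := by
      simp [PySem.Str.slice]
      rw [PySem.List.slice_to _ hge]
    have hBcount : PySem.Str.count (PySem.Str.slice s none (some (PySem.Str.find s "/"))) "."
        = (s.toList.take j).count '.' := by
      rw [(by simp : PySem.Str.count (PySem.Str.slice s none (some (PySem.Str.find s "/"))) "."
        = PySem.Chars.count (PySem.Str.slice s none (some (PySem.Str.find s "/"))).toList ['.'])]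
      rw [hBtoList, pvCountSingle]
    rw [hBcount, pvLoopA_split1 s.toList 0 hin, htake]
    simp
  · -- no '/': A returns len(split)-1, B counts over the whole string
    have hninf : ¬ ['/'] <:+: s.toList := fun hx => hin ((pvSingletonInfix s.toList).mp hx)
    have hIs : PySem.Str.isIn "/" s = false := by
      rw [Bool.eq_false_iff]
      intro hx
      exact hninf (by rwa [PySem.Str.isIn_iff_infix] at hx)
    have hfind : PySem.Str.find s "/" = -1 := by
      rw [(by simp : PySem.Str.find s "/" = PySem.Chars.find s.toList ['/']),
        PySem.Chars.find_eq_neg_one_iff]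
      exact hninf
    rw [hIs, hfind]
    simp only [Bool.not_false, beq_self_eq_true, if_pos]
    rw [(by simp : PySem.Str.count s "." = PySem.Chars.count s.toList ['.']),
      pvCountSingle, pvLenSplit1]
    push_cast
    ring
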